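-- pv_equiv track=rewrite | github.com/JuRehl/Teoria-De-algoritmos-buchwald-FIUBA | Primer parcial/Greedy/bifurcaciones_en_ruta.py | bifurcaciones_con_patrulla
-- ===== SOURCE A (Python) =====
-- def bifurcaciones_con_patrulla(ciudades):
--     ciudades_ord = sorted(ciudades, key=lambda x: x[1])
--     patrullas = []
--     i = 0
--     n = len(ciudades_ord)
--     while i < n:
--         km_patrulla = ciudades_ord[i][1] + 50
--         j = i
--         while j < n and ciudades_ord[j][1] <= km_patrulla:
--             j += 1
--
--         patrullas.append(ciudades_ord[j-1])
--         km_patrulla = ciudades_ord[j-1][1] + 50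
--
--         while i < n and ciudades_ord[i][1] <= km_patrulla:
--             i += 1
--
--     return patrullas
-- ===== SOURCE B (Python) =====
-- def bifurcaciones_con_patrulla(ciudades):
--     # One pass over the sorted list with a small state machine instead of nested index scans.
--     res = []
--     open_group = False
--     start = cand = None
--     for c in sorted(ciudades, key=lambda x: x[1]):
--         if open_group:
--             if c[1] <= start + 50:
--                 cand = c
--                 continue
--             res.append(cand)
--             open_group = False
--         if res and c[1] <= res[-1][1] + 50:
--             continue
--         open_group = True
--         start = c[1]
--         cand = c
--     if open_group:
--         res.append(cand)
--     return res
-- ===== Notes on version B (the rewrite author's own statement) =====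
-- stated objective: alternative
-- what changed: Replaced A's outer while loop with two inner index scans (re-scanning covered cities) by a single pass over the sorted list with a small open-group state machine that appends each patrol when its group closes.
import Mathlib
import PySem

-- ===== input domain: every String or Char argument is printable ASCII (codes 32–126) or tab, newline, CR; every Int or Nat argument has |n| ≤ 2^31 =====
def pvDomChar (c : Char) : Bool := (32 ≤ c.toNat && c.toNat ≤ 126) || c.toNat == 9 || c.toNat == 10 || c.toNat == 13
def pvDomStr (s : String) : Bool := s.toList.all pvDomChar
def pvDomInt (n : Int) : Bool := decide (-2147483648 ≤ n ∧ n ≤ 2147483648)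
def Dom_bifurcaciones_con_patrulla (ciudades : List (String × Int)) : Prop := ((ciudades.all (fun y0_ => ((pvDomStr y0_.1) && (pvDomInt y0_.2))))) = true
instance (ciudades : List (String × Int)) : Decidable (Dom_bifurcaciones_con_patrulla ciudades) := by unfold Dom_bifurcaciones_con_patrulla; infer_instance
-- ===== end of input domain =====

-- B replaces A's nested index scans by one pass over the sorted list with an open-group state machine (alternative structure, same cost).

-- ===== PORT A =====
-- inner `while j < n and L[j][1] <= km: j += 1` scan (also the third loop, reused with the patrol threshold)
def scanA (L : List (String × Int)) (km : Int) (j : Nat) : Nat :=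
  if h : j < L.length then
    if L[j].2 ≤ km then scanA L km (j + 1) else j
  else j
termination_by L.length - j

-- outer `while i < n` loop; the Python loop is total on the sorted list it runs on
-- (i strictly increases each iteration), so fuel L.length + 1 is never exhausted there.
def outerA : Nat → List (String × Int) → Nat → List (String × Int) → List (String × Int)
  | 0, _, _, acc => acc
  | fuel + 1, L, i, acc =>
      if h : i < L.length then
        let j := scanA L (L[i].2 + 50) i
        let p := L.getD (j - 1) ("", 0)
        outerA fuel L (scanA L (p.2 + 50) i) (acc ++ [p])
      else acc

def bifurcaciones_con_patrulla (ciudades : List (String × Int)) : List (String × Int) :=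
  let ciudades_ord := PySem.List.sorted ciudades (fun x => x.2) false
  outerA (ciudades_ord.length + 1) ciudades_ord 0 []

-- ===== PORT B =====
-- state machine of Source B: og = none (no open group) | some (start, cand); a close falls
-- through to the covered-check on the same city, exactly as the Python loop body does.
def altFold (res : List (String × Int)) (og : Option (Int × (String × Int))) (M : List (String × Int)) : List (String × Int) :=
  match og, M with
  | none, [] => res
  | some (_, cand), [] => res ++ [cand]
  | some (start, cand), c :: t =>
      if c.2 ≤ start + 50 then altFold res (some (start, c)) t
      else altFold (res ++ [cand]) none (c :: t)
  | none, c :: t =>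
      if res ≠ [] ∧ c.2 ≤ (res.getLastD ("", 0)).2 + 50 then altFold res none t
      else altFold res (some (c.2, c)) t
termination_by (M.length, if og.isSome then 1 else 0)
decreasing_by all_goals simp_all [Prod.lex_iff]

def bifurcaciones_con_patrulla_alt (ciudades : List (String × Int)) : List (String × Int) :=
  altFold [] none (PySem.List.sorted ciudades (fun x => x.2) false)

-- ===== PRECONDITION & SPEC =====
def Spec_bifurcaciones_con_patrulla (ciudades : List (String × Int)) (out : List (String × Int)) : Prop := out = bifurcaciones_con_patrulla_alt ciudades
instance (ciudades : List (String × Int)) (out : List (String × Int)) : Decidable (Spec_bifurcaciones_con_patrulla ciudades out) := by unfold Spec_bifurcaciones_con_patrulla; infer_instance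

-- ===== CLAIM (what is proved, stated in full; the proofs are below) =====
def Claim_equal_bifurcaciones_con_patrulla : Prop := ∀ (ciudades : List (String × Int)), Dom_bifurcaciones_con_patrulla ciudades → Spec_bifurcaciones_con_patrulla ciudades (bifurcaciones_con_patrulla ciudades)

-- ===== LEMMAS AND PROOFS =====

-- common reference recursion: take the group within 50 of the first uncovered city,
-- patrol at its last member, drop everything the patrol covers
-- common reference recursion: take the group within 50 of the first uncovered city,
-- patrol at its last member, drop everything the patrol covers
def gref : Nat → List (String × Int) → List (String × Int)
  | 0, _ => []
  | _ + 1, [] => []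
  | fuel + 1, c :: t =>
      ((c :: t).takeWhile (fun x => decide (x.2 ≤ c.2 + 50))).getLastD c ::
        gref fuel ((c :: t).dropWhile (fun x =>
          decide (x.2 ≤ (((c :: t).takeWhile (fun x => decide (x.2 ≤ c.2 + 50))).getLastD c).2 + 50)))

lemma scanA_eq (L : List (String × Int)) (km : Int) (i : Nat) :
    scanA L km i = i + ((L.drop i).takeWhile (fun x => decide (x.2 ≤ km))).length := by
  fun_induction scanA L km i with
  | case1 i h hle ih =>
    rw [ih, ← List.getElem_cons_drop h, List.takeWhile_cons_of_pos (by simpa using hle)]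
    simp; omega
  | case2 i h hle =>
    rw [← List.getElem_cons_drop h, List.takeWhile_cons_of_neg (by simpa using hle)]
    simp
  | case3 i h =>
    rw [List.drop_eq_nil_of_le (by omega)]
    simp

lemma getLastD_takeWhile_ge (c : String × Int) (t : List (String × Int)) (p : (String × Int) → Bool)
    (hs : (c :: t).Pairwise (fun a b => a.2 ≤ b.2)) : c.2 ≤ ((t.takeWhile p).getLastD c).2 := by
  have hmem : (t.takeWhile p).getLastD c ∈ c :: t.takeWhile p := List.getLastD_mem_cons
  rcases List.mem_cons.mp hmem with h | h
  · rw [h]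
  · exact (List.pairwise_cons.mp hs).1 _ (List.Sublist.mem h (List.takeWhile_sublist p))

lemma getD_cons_append (a : String × Int) (l rest : List (String × Int)) (d : String × Int) :
    ((a :: l) ++ rest).getD l.length d = l.getLastD a := by
  induction l generalizing a with
  | nil => simp [List.getD]
  | cons b l ih =>
    simp only [List.length_cons, List.cons_append, List.getD_cons_succ]
    rw [← List.cons_append, ih, List.getLastD_cons]

lemma dropWhile_dropWhile_of_imp (p q : (String × Int) → Bool)
    (himp : ∀ x, p x = true → q x = true) : ∀ l : List (String × Int),
    (l.dropWhile p).dropWhile q = l.dropWhile q := by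
  intro l
  induction l with
  | nil => rfl
  | cons a l ih =>
    by_cases hp : p a = true
    · rw [List.dropWhile_cons_of_pos hp, List.dropWhile_cons_of_pos (himp a hp), ih]
    · rw [List.dropWhile_cons_of_neg hp]

lemma outerA_eq_gref : ∀ (fuel : Nat) (L : List (String × Int)) (i : Nat) (acc : List (String × Int)),
    L.Pairwise (fun a b => a.2 ≤ b.2) → L.length ≤ i + fuel →
    outerA fuel L i acc = acc ++ gref fuel (L.drop i) := by
  intro fuel
  induction fuel with
  | zero =>
    intro L i acc _ hlen
    simp [outerA, gref]
  | succ f ih =>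
    intro L i acc hs hlen
    by_cases hi : i < L.length
    · have hdrop : L.drop i = L[i] :: L.drop (i + 1) := (List.getElem_cons_drop hi).symm
      have hsdrop : (L.drop i).Pairwise (fun a b => a.2 ≤ b.2) := hs.sublist (List.drop_sublist _ _)
      have hsdrop' : (L[i] :: L.drop (i + 1)).Pairwise (fun a b => a.2 ≤ b.2) := hdrop ▸ hsdrop
      obtain ⟨tw1, htw1⟩ : ∃ w, (L.drop (i + 1)).takeWhile (fun x => decide (x.2 ≤ L[i].2 + 50)) = w :=
        ⟨_, rfl⟩
      have htw : (L.drop i).takeWhile (fun x => decide (x.2 ≤ L[i].2 + 50)) = L[i] :: tw1 := by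
        rw [hdrop, List.takeWhile_cons_of_pos (by simp), htw1]
      obtain ⟨p, hp⟩ : ∃ w, tw1.getLastD L[i] = w := ⟨_, rfl⟩
      have hpge : L[i].2 ≤ p.2 := by
        have := getLastD_takeWhile_ge L[i] (L.drop (i + 1))
          (fun x => decide (x.2 ≤ L[i].2 + 50)) hsdrop'
        rwa [htw1, hp] at this
      obtain ⟨tw2, htw2e⟩ : ∃ w, (L.drop (i + 1)).takeWhile (fun x => decide (x.2 ≤ p.2 + 50)) = w :=
        ⟨_, rfl⟩
      have htw2 : (L.drop i).takeWhile (fun x => decide (x.2 ≤ p.2 + 50)) = L[i] :: tw2 := by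
        rw [hdrop, List.takeWhile_cons_of_pos (by simp; omega), htw2e]
      have hgetD : L.getD (i + (L[i] :: tw1).length - 1) ("", 0) = p := by
        have h1 : i + (L[i] :: tw1).length - 1 = i + tw1.length := by simp
        have h2 : (L.drop i).getD tw1.length ("", 0) = p := by
          conv_lhs => rw [← List.takeWhile_append_dropWhile
            (p := fun x : String × Int => decide (x.2 ≤ L[i].2 + 50)) (l := L.drop i), htw]
          rw [getD_cons_append, hp]
        rw [h1, List.getD_eq_getElem?_getD, ← List.getElem?_drop, ← List.getD_eq_getElem?_getD, h2]
      have hstep : outerA (f + 1) L i acc = outerA f L (i + (L[i] :: tw2).length) (acc ++ [p]) := by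
        rw [outerA]
        simp only [hi, dite_true]
        rw [scanA_eq, scanA_eq, htw, hgetD, htw2]
      have hdrop2 : L.drop (i + (L[i] :: tw2).length)
          = (L.drop i).dropWhile (fun x => decide (x.2 ≤ p.2 + 50)) := by
        rw [← List.drop_drop]
        conv_lhs => rw [← List.takeWhile_append_dropWhile
          (p := fun x : String × Int => decide (x.2 ≤ p.2 + 50)) (l := L.drop i)]
        rw [List.drop_left' (by rw [htw2])]
      have hgref : gref (f + 1) (L.drop i)
          = p :: gref f ((L.drop i).dropWhile (fun x => decide (x.2 ≤ p.2 + 50))) := by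
        conv_lhs => rw [hdrop]
        rw [gref]
        simp only [← hdrop]
        rw [htw, List.getLastD_cons, hp]
      rw [hstep, ih L _ _ hs (by simp; omega), hdrop2, hgref]
      simp
    · rw [outerA]
      simp only [hi, dite_false]
      rw [List.drop_eq_nil_of_le (by omega)]
      rcases f with _ | f <;> simp [gref]

lemma alt_skip : ∀ (M res : List (String × Int)), res ≠ [] →
    altFold res none M
      = altFold res none (M.dropWhile (fun x => decide (x.2 ≤ (res.getLastD ("", 0)).2 + 50))) := by
  intro M
  induction M with
  | nil => intro res _; rfl
  | cons c t ih =>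
    intro res hres
    by_cases hc : c.2 ≤ (res.getLastD ("", 0)).2 + 50
    · rw [List.dropWhile_cons_of_pos (by simpa using hc), ← ih res hres]
      rw [altFold]
      have hc' : c.2 ≤ (res.getLast?.getD ("", 0)).2 + 50 := by
        simpa [List.getLastD_eq_getLast?] using hc
      simp [hres, hc']
    · rw [List.dropWhile_cons_of_neg (by simpa using hc)]

lemma alt_open : ∀ (M : List (String × Int)) (res : List (String × Int)) (start : Int) (cand : String × Int),
    altFold res (some (start, cand)) M
      = altFold (res ++ [(M.takeWhile (fun x => decide (x.2 ≤ start + 50))).getLastD cand]) none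
          (M.dropWhile (fun x => decide (x.2 ≤ start + 50))) := by
  intro M
  induction M with
  | nil => intro res start cand; simp [altFold]
  | cons c t ih =>
    intro res start cand
    by_cases hc : c.2 ≤ start + 50
    · rw [List.takeWhile_cons_of_pos (by simpa using hc),
          List.dropWhile_cons_of_pos (by simpa using hc), List.getLastD_cons]
      rw [show altFold res (some (start, cand)) (c :: t) = altFold res (some (start, c)) t from by
        rw [altFold]; simp [hc]]
      exact ih res start c
    · rw [List.takeWhile_cons_of_neg (by simpa using hc),
          List.dropWhile_cons_of_neg (by simpa using hc)]
      rw [show altFold res (some (start, cand)) (c :: t) = altFold (res ++ [cand]) none (c :: t) from by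
        rw [altFold]; simp [hc]]
      simp

lemma alt_eq_gref : ∀ (fuel : Nat) (M res : List (String × Int)),
    M.Pairwise (fun a b => a.2 ≤ b.2) → M.length < fuel →
    (res = [] ∨ ∀ c ∈ M.head?, ¬ (c.2 ≤ (res.getLastD ("", 0)).2 + 50)) →
    altFold res none M = res ++ gref fuel M := by
  intro fuel
  induction fuel with
  | zero => intro M res _ hlen _; omega
  | succ f ih =>
    intro M res hs hlen hun
    rcases M with _ | ⟨c, t⟩
    · rcases f with _ | f <;> rcases res with _ | r <;> simp [altFold, gref]
    · obtain ⟨cf, hcf⟩ : ∃ w, (t.takeWhile (fun x => decide (x.2 ≤ c.2 + 50))).getLastD c = w :=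
        ⟨_, rfl⟩
      have hcfge : c.2 ≤ cf.2 := hcf ▸ getLastD_takeWhile_ge _ _ _ hs
      have hstep : altFold res none (c :: t) = altFold res (some (c.2, c)) t := by
        rw [altFold]
        rcases hun with h | h
        · simp [h]
        · have h' : ¬ c.2 ≤ (res.getLast?.getD ("", 0)).2 + 50 := by
            have := h c rfl
            simpa [List.getLastD_eq_getLast?] using this
          simp [h']
      rw [hstep, alt_open t res c.2 c, hcf,
          alt_skip _ _ (by simp), List.getLastD_concat,
          dropWhile_dropWhile_of_imp _ _ (by intro x hx; simp at hx ⊢; omega) t]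
      have hun' : ∀ c' ∈ (t.dropWhile (fun x => decide (x.2 ≤ cf.2 + 50))).head?,
          ¬ (c'.2 ≤ ((res ++ [cf]).getLastD ("", 0)).2 + 50) := by
        intro c' hc'
        rw [List.getLastD_concat]
        rw [← List.find?_not_eq_head?_dropWhile] at hc'
        have := List.find?_some hc'
        simp at this
        omega
      rw [ih (t.dropWhile (fun x => decide (x.2 ≤ cf.2 + 50))) (res ++ [cf])
            ((hs.sublist (List.sublist_cons_self c t)).sublist (List.dropWhile_sublist _))
            (by have := List.length_dropWhile_le (fun x : String × Int => decide (x.2 ≤ cf.2 + 50)) t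
                simp at hlen ⊢; omega)
            (Or.inr hun')]
      have hgref : gref (f + 1) (c :: t)
          = cf :: gref f (t.dropWhile (fun x => decide (x.2 ≤ cf.2 + 50))) := by
        rw [gref, List.takeWhile_cons_of_pos (by simp), List.getLastD_cons, hcf,
            List.dropWhile_cons_of_pos (by simp; omega)]
      rw [hgref]
      simp

-- ===== VERDICT (by name: the statement is the Claim_ definition above) =====
theorem bifurcaciones_con_patrulla_spec : Claim_equal_bifurcaciones_con_patrulla := by
  intro cs _
  unfold Spec_bifurcaciones_con_patrulla bifurcaciones_con_patrulla bifurcaciones_con_patrulla_alt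
  have hs := PySem.List.sorted_pairwise cs (fun x : String × Int => x.2)
  set L := PySem.List.sorted cs (fun x : String × Int => x.2) false with hL
  have h1 := outerA_eq_gref (L.length + 1) L 0 [] hs (by omega)
  have h2 := alt_eq_gref (L.length + 1) L [] hs (by omega) (Or.inl rfl)
  simp only [List.drop_zero, List.nil_append] at h1 h2
  rw [h1, h2]
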